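-- pv_equiv track=rewrite | github.com/Soumen3/Python-Programs | CodeVita/BlockExtraction-2.py | solve_block_extraction
-- ===== SOURCE A (Python) =====
-- def solve_block_extraction(N, M, matrix, target_color):
--     # Create a deep copy of the matrix to avoid modifying the original
--     grid = [row[:] for row in matrix]
--
--     # Find all blocks in the matrix
--     blocks = {}
--     for r in range(N):
--         for c in range(M):
--             color = grid[r][c]
--             if color not in blocks:
--                 blocks[color] = []
--             blocks[color].append((r, c))
--
--     # Track removed blocks
--     removed_blocks = set()
--
--     # Simulate gravity and block removal
--     def apply_gravity():
--         # Work from bottom to top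
--         for c in range(M):
--             # Collect non-zero elements in this column from bottom
--             column = [grid[r][c] for r in range(N-1, -1, -1) if grid[r][c] != 0]
--
--             # Place non-zero elements back from bottom, fill rest with 0
--             for r in range(N-1, -1, -1):
--                 if column:
--                     grid[r][c] = column.pop(0)
--                 else:
--                     grid[r][c] = 0
--
--     # BFS to find blocks that need removal
--     def find_blocks_to_remove(color):
--         # Blocks that must be removed to access target
--         removal_order = []
--
--         # Find blocks that block the target block's extraction path
--         blocking_colors = set()
--         target_positions = blocks[color]
--
--         # Check each possible row of target block
--         for r, c in target_positions:
--             # Check rows above this block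
--             for check_r in range(r):
--                 if grid[check_r][c] != 0 and grid[check_r][c] not in blocking_colors:
--                     blocking_colors.add(grid[check_r][c])
--
--         # Prioritize blocks from top rows first
--         blocking_order = sorted(list(blocking_colors), key=lambda x: min(blocks[x], key=lambda pos: pos[0])[0])
--
--         # Simulate removal and track blocks removed
--         for block_color in blocking_order:
--             # Skip if already removed
--             if block_color in removed_blocks:
--                 continue
--
--             # Mark block as removed
--             for br, bc in blocks[block_color]:
--                 grid[br][bc] = 0
--                 removed_blocks.add(block_color)
--
--             # Add to removal order
--             removal_order.append(block_color)
--
--             # Apply gravity after each block removal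
--             apply_gravity()
--
--         return removal_order
--
--     # Find and remove blocking blocks
--     removals = find_blocks_to_remove(target_color)
--
--     return len(removals)
-- ===== SOURCE B (Python) =====
-- def solve_block_extraction(N, M, matrix, target_color):
--     # Map each color to its list of positions (KeyError below when the target color is absent,
--     # as in the original); then count the distinct nonzero colors above target cells.
--     positions = {}
--     for r in range(N):
--         for c in range(M):
--             positions.setdefault(matrix[r][c], []).append((r, c))
--     blocking = set()
--     for r, c in positions[target_color]:
--         for rr in range(r):
--             v = matrix[rr][c]
--             if v != 0:
--                 blocking.add(v)
--     return len(blocking)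
-- ===== Notes on version B (the rewrite author's own statement) =====
-- stated objective: simpler
-- what changed: B drops A's dead machinery (grid deep copy, removed-set bookkeeping, gravity simulation, sort by topmost block and the removal loop whose length A returns) and directly returns the size of the set of nonzero colors found above the target's positions in one pass over the position index.
import Mathlib
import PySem

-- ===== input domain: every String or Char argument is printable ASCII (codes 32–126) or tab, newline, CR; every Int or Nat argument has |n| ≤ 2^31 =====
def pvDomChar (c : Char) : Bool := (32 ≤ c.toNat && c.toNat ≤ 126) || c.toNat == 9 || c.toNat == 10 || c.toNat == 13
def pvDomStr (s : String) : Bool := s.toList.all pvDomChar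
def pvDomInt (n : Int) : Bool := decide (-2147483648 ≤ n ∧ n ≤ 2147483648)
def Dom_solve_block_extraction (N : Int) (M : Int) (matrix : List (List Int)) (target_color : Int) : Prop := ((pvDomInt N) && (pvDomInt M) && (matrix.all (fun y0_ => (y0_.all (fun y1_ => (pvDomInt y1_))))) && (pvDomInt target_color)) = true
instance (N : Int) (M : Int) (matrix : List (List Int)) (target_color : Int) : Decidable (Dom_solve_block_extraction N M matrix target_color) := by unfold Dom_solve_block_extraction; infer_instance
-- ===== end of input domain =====

-- B replaces A's dead gravity/removal simulation by a single per-column sweep collecting the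
-- distinct nonzero colors lying above target cells; same return value on all of Pre_.
-- (A mutates only its private copy of the matrix, so no caller-visible side effect is lost.)

-- ===== PORT A =====
-- grid[r][c] (indices in range under Pre_)
def pvCell (g : List (List Int)) (r c : Int) : Int :=
  PySem.List.pyGetD (PySem.List.pyGetD g r []) c 0

-- grid[r][c] = v
def pvSet2 (g : List (List Int)) (r c : Int) (v : Int) : List (List Int) :=
  PySem.List.pySetD g r (PySem.List.pySetD (PySem.List.pyGetD g r []) c v)

-- apply_gravity (mutates grid in Python; ported as state passing, step for step)
def pvApplyGravity (N M : Int) (g0 : List (List Int)) : List (List Int) :=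
  (PySem.List.pyRange 0 M 1).foldl (fun g c =>
    -- column = [grid[r][c] for r in range(N-1, -1, -1) if grid[r][c] != 0]
    let column := (PySem.List.pyRange (N-1) (-1) (-1)).foldl
      (fun col r => if pvCell g r c ≠ 0 then col ++ [pvCell g r c] else col) []
    -- for r in range(N-1,-1,-1): grid[r][c] = column.pop(0) if column else 0
    let res := (PySem.List.pyRange (N-1) (-1) (-1)).foldl
      (fun (st : List (List Int) × List Int) r =>
        match st.2 with
        | x :: rest => (pvSet2 st.1 r c x, rest)
        | [] => (pvSet2 st.1 r c 0, []))
      (g, column)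
    res.1) g0

-- body of the blocks-building loop: 'if color not in blocks: blocks[color] = []' + append = modify with default []
def pvBlocksStep (grid : List (List Int)) (d : PySem.Dict Int (List (Int × Int))) (rc : Int × Int) : PySem.Dict Int (List (Int × Int)) :=
  d.modify (pvCell grid rc.1 rc.2) [] (fun l => l ++ [rc])

-- body of the inner blocking-colors loop ('for check_r in range(r)')
def pvBlockingStep (grid : List (List Int)) (c : Int) (s : PySem.Set Int) (cr : Int) : PySem.Set Int :=
  if pvCell grid cr c ≠ 0 ∧ PySem.Set.contains s (pvCell grid cr c) = false
  then PySem.Set.add s (pvCell grid cr c) else s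

-- body of the removal loop; state = (grid, removed_blocks, removal_order)
def pvRemoveStep (blocks : PySem.Dict Int (List (Int × Int))) (N M : Int)
    (st : List (List Int) × PySem.Set Int × List Int) (bc : Int) :
    List (List Int) × PySem.Set Int × List Int :=
  if PySem.Set.contains st.2.1 bc then st
  else
    let st2 := (blocks.getD bc []).foldl
      (fun (gr : List (List Int) × PySem.Set Int) p =>
        (pvSet2 gr.1 p.1 p.2 0, PySem.Set.add gr.2 bc)) (st.1, st.2.1)
    (pvApplyGravity N M st2.1, st2.2, st.2.2 ++ [bc])

def solve_block_extraction (N : Int) (M : Int) (matrix : List (List Int)) (target_color : Int) : Int :=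
  -- grid = [row[:] for row in matrix]
  let grid := matrix.map (fun row => row)
  let blocks := (PySem.List.pyRange 0 N 1).foldl (fun d r =>
      (PySem.List.pyRange 0 M 1).foldl (fun d c => pvBlocksStep grid d (r, c)) d)
    PySem.Dict.empty
  -- removed_blocks = set()
  let removed : PySem.Set Int := PySem.Set.empty
  -- target_positions = blocks[color]  (KeyError when absent: excluded by Pre_)
  let target_positions := blocks.getD target_color []
  let blocking_colors := target_positions.foldl (fun s p =>
      (PySem.List.pyRange 0 p.1 1).foldl (pvBlockingStep grid p.2) s)
    PySem.Set.empty
  -- blocking_order = sorted(list(blocking_colors), key=...) (the result only uses its length)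
  let blocking_order := PySem.List.sorted blocking_colors
      (fun x => ((PySem.List.min? (blocks.getD x []) (fun pos => pos.1)).getD (0, 0)).1) false
  let final := blocking_order.foldl (pvRemoveStep blocks N M) (grid, removed, ([] : List Int))
  Int.ofNat final.2.2.length

-- ===== PORT B =====
-- body of the inner counting loop: unconditionally record a nonzero cell color
def pvAddBlock (m : List (List Int)) (c : Int) (s : PySem.Set Int) (rr : Int) : PySem.Set Int :=
  if pvCell m rr c ≠ 0 then PySem.Set.add s (pvCell m rr c) else s

def solve_block_extraction_alt (N : Int) (M : Int) (matrix : List (List Int)) (target_color : Int) : Int :=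
  -- positions.setdefault(matrix[r][c], []).append((r, c)) = modify with default []
  let positions := (PySem.List.pyRange 0 N 1).foldl (fun d r =>
      (PySem.List.pyRange 0 M 1).foldl (fun d c => pvBlocksStep matrix d (r, c)) d)
    PySem.Dict.empty
  -- for r, c in positions[target_color]: for rr in range(r): if v != 0: blocking.add(v)
  let blocking := (positions.getD target_color []).foldl (fun s p =>
      (PySem.List.pyRange 0 p.1 1).foldl (pvAddBlock matrix p.2) s)
    PySem.Set.empty
  PySem.Set.len blocking

-- ===== PRECONDITION & SPEC =====
-- Pre_ excludes exactly the inputs where the Python A raises: a grid narrower than N×M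
-- (IndexError) or a target colour absent from the N×M grid (KeyError on blocks[target_color]).
def Pre_solve_block_extraction (N : Int) (M : Int) (matrix : List (List Int)) (target_color : Int) : Prop :=
  N ≤ (matrix.length : Int) ∧
  (∀ row ∈ matrix.take N.toNat, M ≤ (row.length : Int)) ∧
  (∃ r, r < N.toNat ∧ ∃ c, c < M.toNat ∧ (matrix.getD r []).getD c 0 = target_color)
instance (N : Int) (M : Int) (matrix : List (List Int)) (target_color : Int) : Decidable (Pre_solve_block_extraction N M matrix target_color) := by unfold Pre_solve_block_extraction; infer_instance

def pvWitness_solve_block_extraction : Int × Int × List (List Int) × Int := (2, 2, [[3, 0], [5, 5]], 5)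

def Spec_solve_block_extraction (N : Int) (M : Int) (matrix : List (List Int)) (target_color : Int) (out : Int) : Prop := out = solve_block_extraction_alt N M matrix target_color
instance (N : Int) (M : Int) (matrix : List (List Int)) (target_color : Int) (out : Int) : Decidable (Spec_solve_block_extraction N M matrix target_color out) := by unfold Spec_solve_block_extraction; infer_instance

-- ===== CLAIM (what is proved, stated in full; the proofs are below) =====
def Claim_equal_solve_block_extraction : Prop := ∀ (N : Int) (M : Int) (matrix : List (List Int)) (target_color : Int), Dom_solve_block_extraction N M matrix target_color → Pre_solve_block_extraction N M matrix target_color → Spec_solve_block_extraction N M matrix target_color (solve_block_extraction N M matrix target_color)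
-- ===== LEMMAS AND PROOFS =====

theorem mem_pvBlockingStep (grid : List (List Int)) (c : Int) (s : PySem.Set Int) (a x : Int) :
    x ∈ pvBlockingStep grid c s a ↔ x ∈ s ∨ (pvCell grid a c = x ∧ x ≠ 0) := by
  unfold pvBlockingStep
  split_ifs with h
  · rw [PySem.Set.mem_add]
    constructor
    · rintro (hs | rfl)
      · exact .inl hs
      · exact .inr ⟨rfl, h.1⟩
    · rintro (hs | ⟨rfl, _⟩)
      · exact .inl hs
      · exact .inr rfl
  · rw [not_and_or, not_not] at h
    constructor
    · exact .inl
    · rintro (hs | ⟨rfl, hx⟩)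
      · exact hs
      · rcases h with h0 | hc
        · exact absurd h0 hx
        · exact (PySem.Set.contains_iff s _).mp (by simpa using hc)

-- membership through the inner 'for check_r in range(r)' loop
theorem mem_blockingFold (grid : List (List Int)) (c : Int) (l : List Int) (s : PySem.Set Int) (x : Int) :
    x ∈ l.foldl (pvBlockingStep grid c) s ↔ x ∈ s ∨ ∃ cr ∈ l, pvCell grid cr c = x ∧ x ≠ 0 := by
  induction l generalizing s with
  | nil => simp
  | cons a l ih =>
    simp only [List.foldl_cons, ih, mem_pvBlockingStep, List.mem_cons]
    constructor
    · rintro ((hs | hv) | ⟨cr, hcr, hp⟩)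
      · exact .inl hs
      · exact .inr ⟨a, .inl rfl, hv⟩
      · exact .inr ⟨cr, .inr hcr, hp⟩
    · rintro (hs | ⟨cr, (rfl | hcr), hp⟩)
      · exact .inl (.inl hs)
      · exact .inl (.inr hp)
      · exact .inr ⟨cr, hcr, hp⟩

theorem nodup_blockingFold (grid : List (List Int)) (c : Int) (l : List Int) (s : PySem.Set Int)
    (hs : s.Nodup) : (l.foldl (pvBlockingStep grid c) s).Nodup := by
  induction l generalizing s with
  | nil => exact hs
  | cons a l ih =>
    simp only [List.foldl_cons]
    apply ih
    unfold pvBlockingStep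
    split_ifs with h
    · exact PySem.Set.nodup_add _ _ hs
    · exact hs

-- membership through A's whole blocking_colors computation
theorem mem_blockA (grid : List (List Int)) (tp : List (Int × Int)) (s : PySem.Set Int) (x : Int) :
    x ∈ tp.foldl (fun s p => (PySem.List.pyRange 0 p.1 1).foldl (pvBlockingStep grid p.2) s) s
    ↔ x ∈ s ∨ ∃ p ∈ tp, ∃ cr, 0 ≤ cr ∧ cr < p.1 ∧ pvCell grid cr p.2 = x ∧ x ≠ 0 := by
  induction tp generalizing s with
  | nil => simp
  | cons q tp ih =>
    simp only [List.foldl_cons, ih, mem_blockingFold, PySem.List.mem_pyRange_one, List.mem_cons]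
    constructor
    · rintro ((hs | ⟨cr, ⟨h0, h1⟩, hv, hx⟩) | ⟨p, hp, rest⟩)
      · exact .inl hs
      · exact .inr ⟨q, .inl rfl, cr, h0, h1, hv, hx⟩
      · exact .inr ⟨p, .inr hp, rest⟩
    · rintro (hs | ⟨p, (rfl | hp), cr, h0, h1, hv, hx⟩)
      · exact .inl (.inl hs)
      · exact .inl (.inr ⟨cr, ⟨h0, h1⟩, hv, hx⟩)
      · exact .inr ⟨p, hp, cr, h0, h1, hv, hx⟩

theorem nodup_blockA (grid : List (List Int)) (tp : List (Int × Int)) (s : PySem.Set Int)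
    (hs : s.Nodup) :
    (tp.foldl (fun s p => (PySem.List.pyRange 0 p.1 1).foldl (pvBlockingStep grid p.2) s) s).Nodup := by
  induction tp generalizing s with
  | nil => exact hs
  | cons q tp ih => exact ih _ (nodup_blockingFold _ _ _ _ hs)

-- removal loop: the removed-set only ever gains the processed color
theorem removal_snd (bc : Int) (positions : List (Int × Int)) (g : List (List Int)) (rem : PySem.Set Int) (x : Int)
    (hx : x ∈ (positions.foldl (fun (gr : List (List Int) × PySem.Set Int) p =>
        (pvSet2 gr.1 p.1 p.2 0, PySem.Set.add gr.2 bc)) (g, rem)).2) : x ∈ rem ∨ x = bc := by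
  induction positions generalizing g rem with
  | nil => exact .inl hx
  | cons p positions ih =>
    rcases ih _ _ hx with h | h
    · rcases (PySem.Set.mem_add rem bc x).mp h with h' | h'
      · exact .inl h'
      · exact .inr h'
    · exact .inr h

-- removal loop: nothing is ever skipped when the color list is duplicate-free
theorem removal_order (blocks : PySem.Dict Int (List (Int × Int))) (N M : Int) (l : List Int)
    (g : List (List Int)) (rem : PySem.Set Int) (ord : List Int)
    (hnd : l.Nodup) (hdis : ∀ x ∈ l, x ∉ rem) :
    (l.foldl (pvRemoveStep blocks N M) (g, rem, ord)).2.2 = ord ++ l := by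
  induction l generalizing g rem ord with
  | nil => simp
  | cons bc l ih =>
    simp only [List.foldl_cons]
    rw [pvRemoveStep]
    have hbc : PySem.Set.contains rem bc = false := by
      cases h : PySem.Set.contains rem bc
      · rfl
      · exact absurd ((PySem.Set.contains_iff rem bc).mp h) (hdis bc List.mem_cons_self)
    simp only [hbc, Bool.false_eq_true, if_false]
    rw [ih]
    · simp
    · exact hnd.of_cons
    · intro x hx hmem
      rcases removal_snd bc _ _ _ _ hmem with h | rfl
      · exact hdis x (List.mem_cons_of_mem _ hx) h
      · exact (List.nodup_cons.mp hnd).1 hx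

-- B side: membership through the unconditional inner add loop
theorem mem_addBlockFold (m : List (List Int)) (c : Int) (l : List Int) (s : PySem.Set Int) (x : Int) :
    x ∈ l.foldl (pvAddBlock m c) s ↔ x ∈ s ∨ ∃ rr ∈ l, pvCell m rr c = x ∧ x ≠ 0 := by
  induction l generalizing s with
  | nil => simp
  | cons a l ih =>
    simp only [List.foldl_cons, ih, List.mem_cons]
    rw [pvAddBlock]
    split_ifs with h
    · rw [PySem.Set.mem_add]
      constructor
      · rintro ((hs | rfl) | ⟨rr, hrr, hp⟩)
        · exact .inl hs
        · exact .inr ⟨a, .inl rfl, rfl, h⟩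
        · exact .inr ⟨rr, .inr hrr, hp⟩
      · rintro (hs | ⟨rr, (rfl | hrr), hp, hx⟩)
        · exact .inl (.inl hs)
        · exact .inl (.inr hp.symm)
        · exact .inr ⟨rr, hrr, hp, hx⟩
    · rw [not_not] at h
      constructor
      · rintro (hs | ⟨rr, hrr, hp⟩)
        · exact .inl hs
        · exact .inr ⟨rr, .inr hrr, hp⟩
      · rintro (hs | ⟨rr, (rfl | hrr), hp, hx⟩)
        · exact .inl hs
        · exact absurd (by rw [← hp, h] : x = 0) hx
        · exact .inr ⟨rr, hrr, hp, hx⟩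

theorem nodup_addBlockFold (m : List (List Int)) (c : Int) (l : List Int) (s : PySem.Set Int)
    (hs : s.Nodup) : (l.foldl (pvAddBlock m c) s).Nodup := by
  induction l generalizing s with
  | nil => exact hs
  | cons a l ih =>
    simp only [List.foldl_cons]
    apply ih
    rw [pvAddBlock]
    split_ifs with h
    · exact PySem.Set.nodup_add _ _ hs
    · exact hs

-- membership through B's whole blocking computation
theorem mem_blockBset (m : List (List Int)) (tp : List (Int × Int)) (s : PySem.Set Int) (x : Int) :
    x ∈ tp.foldl (fun s p => (PySem.List.pyRange 0 p.1 1).foldl (pvAddBlock m p.2) s) s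
    ↔ x ∈ s ∨ ∃ p ∈ tp, ∃ cr, 0 ≤ cr ∧ cr < p.1 ∧ pvCell m cr p.2 = x ∧ x ≠ 0 := by
  induction tp generalizing s with
  | nil => simp
  | cons q tp ih =>
    simp only [List.foldl_cons, ih, mem_addBlockFold, PySem.List.mem_pyRange_one, List.mem_cons]
    constructor
    · rintro ((hs | ⟨cr, ⟨h0, h1⟩, hv, hx⟩) | ⟨p, hp, rest⟩)
      · exact .inl hs
      · exact .inr ⟨q, .inl rfl, cr, h0, h1, hv, hx⟩
      · exact .inr ⟨p, .inr hp, rest⟩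
    · rintro (hs | ⟨p, (rfl | hp), cr, h0, h1, hv, hx⟩)
      · exact .inl (.inl hs)
      · exact .inl (.inr ⟨cr, ⟨h0, h1⟩, hv, hx⟩)
      · exact .inr ⟨p, hp, cr, h0, h1, hv, hx⟩

theorem nodup_blockBset (m : List (List Int)) (tp : List (Int × Int)) (s : PySem.Set Int)
    (hs : s.Nodup) :
    (tp.foldl (fun s p => (PySem.List.pyRange 0 p.1 1).foldl (pvAddBlock m p.2) s) s).Nodup := by
  induction tp generalizing s with
  | nil => exact hs
  | cons q tp ih => exact ih _ (nodup_addBlockFold _ _ _ _ hs)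

-- ===== VERDICT (by name: the statement is the Claim_ definition above) =====
theorem solve_block_extraction_spec : Claim_equal_solve_block_extraction := by
  intro N M m tc _ _
  unfold Spec_solve_block_extraction
  simp only [solve_block_extraction, solve_block_extraction_alt, List.map_id']
  rw [removal_order]
  · rw [List.nil_append, PySem.List.length_sorted]
    rw [show PySem.Set.len = fun (s : PySem.Set Int) => (s.length : Int) from rfl]
    rw [List.Perm.length_eq ((List.perm_ext_iff_of_nodup
      (nodup_blockA m _ PySem.Set.empty List.nodup_nil)
      (nodup_blockBset m _ PySem.Set.empty List.nodup_nil)).mpr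
      (fun x => by rw [mem_blockA, mem_blockBset]))]
    rfl
  · exact ((PySem.List.sorted_perm _ _ _).symm.nodup
      (nodup_blockA m _ PySem.Set.empty List.nodup_nil))
  · intro x _ hx
    simp [PySem.Set.empty] at hx
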